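-- pv_equiv track=rewrite | github.com/neo-rs/rsbots | Instorebotforwarder/instore_auto_mirror_bot.py | pick_links
-- ===== SOURCE A (Python) =====
-- from typing import Any, Dict, List, Optional, Tuple
-- from typing import Optional, List, Tuple, Dict
--
-- def is_discord_internal_url(url: str) -> bool:
--     u = (url or "").lower()
--     return ("discord.com/channels" in u) or ("discord.gg/" in u) or ("discordapp.com/channels" in u)
--
-- MARKET_DOMAINS = (
--     "ebay.", "stockx.", "goat.", "grailed.", "mercari.", "poshmark.",
--     "depop.", "offerup.", "facebook.com/marketplace", "whatnot.", "etsy."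
-- )
--
-- def is_market_url(url: str) -> bool:
--     u = (url or "").lower()
--     return any(d in u for d in MARKET_DOMAINS)
--
-- def pick_links(urls: List[str]) -> Tuple[str, str]:
--     """
--     Returns: (store_link, market_link)
--     - Ignore Discord internal URLs.
--     - market_link: first market URL
--     - store_link: first non-market URL
--     - If only a market URL exists, store_link stays empty.
--     """
--     clean = [u for u in (urls or []) if u and not is_discord_internal_url(u)]
--     store = ""
--     market = ""
--     for u in clean:
--         if not market and is_market_url(u):
--             market = u
--             continue
--         if not store and not is_market_url(u):
--             store = u
--     return store, market
-- ===== SOURCE B (Python) =====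
-- from typing import List, Tuple
--
-- def is_discord_internal_url(url: str) -> bool:
--     u = (url or "").lower()
--     return ("discord.com/channels" in u) or ("discord.gg/" in u) or ("discordapp.com/channels" in u)
--
-- MARKET_DOMAINS = (
--     "ebay.", "stockx.", "goat.", "grailed.", "mercari.", "poshmark.",
--     "depop.", "offerup.", "facebook.com/marketplace", "whatnot.", "etsy."
-- )
--
-- def is_market_url(url: str) -> bool:
--     u = (url or "").lower()
--     return any(d in u for d in MARKET_DOMAINS)
--
-- def pick_links(urls: List[str]) -> Tuple[str, str]:
--     clean = [u for u in (urls or []) if u and not is_discord_internal_url(u)]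
--     market = next((u for u in clean if is_market_url(u)), "")
--     store = next((u for u in clean if not is_market_url(u)), "")
--     return store, market
-- ===== Notes on version B (the rewrite author's own statement) =====
-- stated objective: idiomatic
-- what changed: Replaces the single stateful loop with interleaved slot-filling and a continue by two independent first-match scans (next over a generator) for the first market URL and the first non-market URL.
import Mathlib
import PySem

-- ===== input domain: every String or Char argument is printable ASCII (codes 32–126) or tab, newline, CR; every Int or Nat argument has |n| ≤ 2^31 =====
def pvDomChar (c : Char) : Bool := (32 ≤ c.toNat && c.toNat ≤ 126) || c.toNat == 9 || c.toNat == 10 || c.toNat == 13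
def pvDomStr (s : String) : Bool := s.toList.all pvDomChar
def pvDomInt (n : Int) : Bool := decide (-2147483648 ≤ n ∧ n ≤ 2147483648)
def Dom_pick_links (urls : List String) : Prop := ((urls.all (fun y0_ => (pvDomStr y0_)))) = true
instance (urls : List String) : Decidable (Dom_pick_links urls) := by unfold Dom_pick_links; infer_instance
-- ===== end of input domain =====

-- B replaces A's single stateful loop by two independent first-match scans over the cleaned list (more idiomatic; same cost).


-- ===== PORT A =====
def is_discord_internal_url (url : String) : Bool :=
  let u := PySem.Str.lower url
  PySem.Str.isIn "discord.com/channels" u || PySem.Str.isIn "discord.gg/" u ||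
    PySem.Str.isIn "discordapp.com/channels" u

def MARKET_DOMAINS : List String :=
  ["ebay.", "stockx.", "goat.", "grailed.", "mercari.", "poshmark.",
   "depop.", "offerup.", "facebook.com/marketplace", "whatnot.", "etsy."]

def is_market_url (url : String) : Bool :=
  let u := PySem.Str.lower url
  MARKET_DOMAINS.any (fun d => PySem.Str.isIn d u)

-- the body of A's for-loop, state = (store, market)
def pickStep (sm : String × String) (u : String) : String × String :=
  if sm.2 == "" && is_market_url u then (sm.1, u)
  else if sm.1 == "" && !is_market_url u then (u, sm.2)
  else sm

def pick_links (urls : List String) : String × String :=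
  let clean := urls.filter (fun u => !(u == "") && !is_discord_internal_url u)
  clean.foldl pickStep ("", "")

-- ===== PORT B =====
def pick_links_alt (urls : List String) : String × String :=
  let clean := urls.filter (fun u => !(u == "") && !is_discord_internal_url u)
  let market := (clean.find? (fun u => is_market_url u)).getD ""
  let store := (clean.find? (fun u => !is_market_url u)).getD ""
  (store, market)

-- ===== PRECONDITION & SPEC =====
def Spec_pick_links (urls : List String) (out : String × String) : Prop := out = pick_links_alt urls
instance (urls : List String) (out : String × String) : Decidable (Spec_pick_links urls out) := by unfold Spec_pick_links; infer_instance

-- ===== CLAIM (what is proved, stated in full; the proofs are below) =====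
def Claim_equal_pick_links : Prop := ∀ (urls : List String), Dom_pick_links urls → Spec_pick_links urls (pick_links urls)

-- ===== LEMMAS AND PROOFS =====
theorem pickStep_foldl (l : List String) (hl : ∀ x ∈ l, x ≠ "") (s m : String) :
    l.foldl pickStep (s, m) =
      (if s = "" then (l.find? (fun u => !is_market_url u)).getD "" else s,
       if m = "" then (l.find? (fun u => is_market_url u)).getD "" else m) := by
  induction l generalizing s m with
  | nil => simp
  | cons u l ih =>
    have hu0 : u ≠ "" := hl u (by simp)
    have hl' : ∀ x ∈ l, x ≠ "" := fun x hx => hl x (by simp [hx])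
    by_cases hu : is_market_url u = true <;>
      by_cases hs : s = "" <;> by_cases hm : m = "" <;>
        simp [pickStep, hu, hs, hm, ih hl', hu0]

-- ===== VERDICT (by name: the statement is the Claim_ definition above) =====
theorem pick_links_spec : Claim_equal_pick_links := by
  intro urls _
  unfold Spec_pick_links pick_links pick_links_alt
  rw [pickStep_foldl _ (fun x hx => by have h := (List.mem_filter.mp hx).2; simp at h; exact h.1)]
  simp
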